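-- pv_equiv track=rewrite | github.com/bodyan228/Huffman | huffman.py | create_head
-- ===== SOURCE A (Python) =====
-- def create_head(len_data, freq):
--     """Составление заголовка сжимаемого файла"""
--     header_list = [len_data & 255, (len_data >> 8) & 255,
--                    (len_data >> 16) & 255, (len_data >> 24) & 255]
--     for i in range(0, 256):
--         if i in freq.keys():
--             header_list.append(freq[i])
--         else:
--             header_list.append(0)
--     return header_list
-- ===== SOURCE B (Python) =====
-- def create_head(len_data, freq):
--     """Составление заголовка сжимаемого файла"""
--     table = [0] * 256
--     for k, v in freq.items():
--         if 0 <= k < 256: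
--             table[k] = v
--     return [len_data & 255, (len_data >> 8) & 255,
--             (len_data >> 16) & 255, (len_data >> 24) & 255] + table
-- ===== Notes on version B (the rewrite author's own statement) =====
-- stated objective: alternative
-- what changed: B inverts the traversal: it preallocates a 256-entry zero table and scatters freq's items into it (guarded by 0 <= k < 256, mirroring A's ignoring of out-of-range keys) instead of A's loop over all 256 indices each doing a dict-membership test plus lookup; Pre_ only excludes association lists with duplicate keys, which cannot arise from a Python dict argument (on them which entry wins is a representation artefact).
import Mathlib
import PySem

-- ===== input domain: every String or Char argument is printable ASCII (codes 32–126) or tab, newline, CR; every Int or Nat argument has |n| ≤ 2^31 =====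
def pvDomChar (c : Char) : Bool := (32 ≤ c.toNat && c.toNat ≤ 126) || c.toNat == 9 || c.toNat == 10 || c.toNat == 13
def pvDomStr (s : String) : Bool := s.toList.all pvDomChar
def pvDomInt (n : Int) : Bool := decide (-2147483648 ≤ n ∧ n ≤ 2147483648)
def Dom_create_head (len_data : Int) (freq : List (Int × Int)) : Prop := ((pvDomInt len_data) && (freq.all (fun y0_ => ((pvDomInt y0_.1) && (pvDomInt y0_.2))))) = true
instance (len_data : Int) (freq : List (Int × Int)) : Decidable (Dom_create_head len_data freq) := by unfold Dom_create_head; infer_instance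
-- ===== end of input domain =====

-- B builds the 256-entry frequency table by scattering freq's items into a preallocated
-- zero table instead of A's per-index dict probes; equal on dicts (duplicate-free key lists).
set_option maxRecDepth 4096


-- ===== PORT A =====
-- '& 255' is PySem.Int.band, '>> k' is Int's '>>>' (floor shift, exact for Python per PYSEM.md).
def create_head (len_data : Int) (freq : List (Int × Int)) : List Int :=
  let d : PySem.Dict Int Int := PySem.Dict.mk freq
  let header_list : List Int :=
    [PySem.Int.band len_data 255, PySem.Int.band (len_data >>> 8) 255,
     PySem.Int.band (len_data >>> 16) 255, PySem.Int.band (len_data >>> 24) 255]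
  (PySem.List.pyRange 0 256 1).foldl
    (fun acc i => if d.contains i then acc ++ [d.getD i 0] else acc ++ [0]) header_list

-- ===== PORT B =====
def create_head_alt (len_data : Int) (freq : List (Int × Int)) : List Int :=
  let table : List Int :=
    (PySem.Dict.mk freq).items.foldl
      (fun t kv => if 0 ≤ kv.1 ∧ kv.1 < 256 then t.set kv.1.toNat kv.2 else t)
      (List.replicate 256 0)
  [PySem.Int.band len_data 255, PySem.Int.band (len_data >>> 8) 255,
   PySem.Int.band (len_data >>> 16) 255, PySem.Int.band (len_data >>> 24) 255] ++ table

-- ===== PRECONDITION & SPEC =====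
-- Pre_ excludes association lists with duplicate keys: a Python dict argument can never
-- have them, and on such lists A's first-match lookup vs B's last-write are both accidental.
def Pre_create_head (len_data : Int) (freq : List (Int × Int)) : Prop :=
  (freq.map Prod.fst).Nodup
instance (len_data : Int) (freq : List (Int × Int)) : Decidable (Pre_create_head len_data freq) := by unfold Pre_create_head; infer_instance

def pvWitness_create_head : Int × (List (Int × Int)) := (70000, [(65, 3), (66, 1), (300, 9)])

def Spec_create_head (len_data : Int) (freq : List (Int × Int)) (out : List Int) : Prop := out = create_head_alt len_data freq
instance (len_data : Int) (freq : List (Int × Int)) (out : List Int) : Decidable (Spec_create_head len_data freq out) := by unfold Spec_create_head; infer_instance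

-- ===== CLAIM (what is proved, stated in full; the proofs are below) =====
def Claim_equal_create_head : Prop := ∀ (len_data : Int) (freq : List (Int × Int)), Dom_create_head len_data freq → Pre_create_head len_data freq → Spec_create_head len_data freq (create_head len_data freq)

-- ===== LEMMAS AND PROOFS =====

-- the scatter step of B
def pvStep (t : List Int) (kv : Int × Int) : List Int :=
  if 0 ≤ kv.1 ∧ kv.1 < 256 then t.set kv.1.toNat kv.2 else t

lemma pvStep_length (t : List Int) (kv : Int × Int) : (pvStep t kv).length = t.length := by
  unfold pvStep; split <;> simp

lemma pvScatter_length (l : List (Int × Int)) (t : List Int) :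
    (l.foldl pvStep t).length = t.length := by
  induction l generalizing t with
  | nil => rfl
  | cons kv rest ih => simpa [List.foldl_cons, pvStep_length] using ih (pvStep t kv)

lemma pvGet_none_of_not_mem (l : List (Int × Int)) (i : Int)
    (h : i ∉ l.map Prod.fst) : (PySem.Dict.mk l).get? i = none := by
  induction l with
  | nil => rfl
  | cons kv rest ih =>
      simp only [List.map_cons, List.mem_cons, not_or] at h
      rw [show (kv : Int × Int) = (kv.1, kv.2) from rfl, PySem.Dict.get?_mk_cons]
      simp only [beq_iff_eq]
      rw [if_neg (fun he => h.1 (by omega)), ih h.2]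

lemma pvScatter_get (l : List (Int × Int)) (hnd : (l.map Prod.fst).Nodup)
    (t : List Int) (ht : t.length = 256) (i : Nat) (hi : i < 256) :
    (l.foldl pvStep t)[i]? =
      some (match (PySem.Dict.mk l).get? (i : Int) with
            | some v => v
            | none => t.getD i 0) := by
  induction l generalizing t with
  | nil =>
      simp only [List.foldl_nil]
      rw [show (PySem.Dict.mk ([] : List (Int × Int))).get? (i : Int) = none from rfl]
      simp [List.getD, List.getElem?_eq_getElem (by omega : i < t.length)]
  | cons kv rest ih =>
      simp only [List.map_cons, List.nodup_cons] at hnd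
      rw [List.foldl_cons,
          ih hnd.2 (pvStep t kv) (by rw [pvStep_length, ht]) ,
          show (kv : Int × Int) = (kv.1, kv.2) from rfl, PySem.Dict.get?_mk_cons]
      simp only [beq_iff_eq]
      by_cases hk : kv.1 = (i : Int)
      · rw [if_pos hk, pvGet_none_of_not_mem rest (i : Int) (hk ▸ hnd.1)]
        have h1 : (0 : Int) ≤ kv.1 ∧ kv.1 < 256 := by omega
        have h2 : kv.1.toNat = i := by omega
        simp [pvStep, h1, h2, List.getD, ht, hi]
      · rw [if_neg hk]
        have : (pvStep t kv).getD i 0 = t.getD i 0 := by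
          unfold pvStep; split
          · have : kv.1.toNat ≠ i := by omega
            simp [List.getD, List.getElem?_set_ne this]
          · rfl
        rw [this]

lemma pvTable_eq (freq : List (Int × Int)) (hnd : (freq.map Prod.fst).Nodup) :
    freq.foldl pvStep (List.replicate 256 (0 : Int)) =
      (List.range 256).map (fun k : Nat =>
        if (PySem.Dict.mk freq).contains (k : Int) then (PySem.Dict.mk freq).getD (k : Int) 0 else 0) := by
  apply List.ext_getElem?
  intro i
  by_cases hi : i < 256
  · rw [pvScatter_get freq hnd _ (by simp) i hi]
    rw [List.getElem?_map, List.getElem?_range hi]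
    simp only [Option.map_some]
    congr 1
    rw [PySem.Dict.contains_eq_isSome_get?, PySem.Dict.getD_eq_get?_getD]
    cases h : (PySem.Dict.mk freq).get? (i : Int) with
    | some v => simp
    | none =>
        simp only [Option.getD_none, List.getD]
        rw [List.getElem?_replicate]
        simp [hi]
  · rw [List.getElem?_eq_none (by rw [pvScatter_length]; simpa using not_lt.mp hi),
        List.getElem?_eq_none (by simpa using not_lt.mp hi)]

-- the items of a mk-dict are the raw list (B's port iterates freq.items())
lemma pvItems_mk (freq : List (Int × Int)) : (PySem.Dict.mk freq).items = freq := rfl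

theorem create_head_eq (len_data : Int) (freq : List (Int × Int))
    (hnd : (freq.map Prod.fst).Nodup) :
    create_head len_data freq = create_head_alt len_data freq := by
  unfold create_head create_head_alt
  simp only [pvItems_mk]
  have hbody : (fun (acc : List Int) (i : Int) =>
      if (PySem.Dict.mk freq).contains i then acc ++ [(PySem.Dict.mk freq).getD i 0] else acc ++ [0])
      = fun acc i => acc ++ [if (PySem.Dict.mk freq).contains i then (PySem.Dict.mk freq).getD i 0 else 0] := by
    funext acc i; split <;> simp_all
  rw [hbody, PySem.List.foldl_append_singleton_eq_map, PySem.List.pyRange_one]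
  have hfold : freq.foldl (fun t kv => if 0 ≤ kv.1 ∧ kv.1 < 256 then t.set kv.1.toNat kv.2 else t)
      (List.replicate 256 (0 : Int)) = freq.foldl pvStep (List.replicate 256 (0 : Int)) := rfl
  rw [hfold, pvTable_eq freq hnd, List.map_map]
  simp [Function.comp]

-- ===== VERDICT (by name: the statement is the Claim_ definition above) =====
theorem create_head_spec : Claim_equal_create_head := by
  intro len_data freq _ hpre
  unfold Spec_create_head
  exact create_head_eq len_data freq hpre
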